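-- pv_equiv track=rewrite | github.com/Fercomp/Algorithms | Learning/Hash/CheckIfIsSubset.py | check_if_subset
-- ===== SOURCE A (Python) =====
-- def check_if_subset(list1, list2):
--     n = len(list1)
--     m = len(list2)
--     has_match = False
--
--     # This n - m avoid test when is not already possible to have list2 as subset
--     # The + 1 is important to include the case where list2 is the sufix of list1
--     for i in range(n - m + 1):
--         if list1[i] == list2[0]:
--             has_match = True
--
--             for j in range(m):
--                 if list1[i + j] != list2[j]:
--                     has_match = False
--                     break
--
--     return has_match
-- ===== SOURCE B (Python) =====
-- def check_if_subset(list1, list2):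
--     m = len(list2)
--     return any(list1[i:i + m] == list2 for i in range(len(list1) - m + 1))
-- ===== Notes on version B (the rewrite author's own statement) =====
-- stated objective: idiomatic
-- what changed: A runs nested index loops and keeps overwriting a has_match flag at every position whose first element matches, so only the last such position decides; B is the standard one-liner any(list1[i:i+m] == list2 for i in range(n-m+1)) with slice comparison and early exit. Pre_ excludes only list2 = [], on which A raises IndexError.
-- intended difference: On inputs where list2 occurs as a contiguous sublist of list1 but the last position j (j <= n-m) with list1[j] == list2[0] is not a full match, A returns False because that later first-element match overwrites has_match; B returns True, the intended sublist-containment answer. — e.g. on check_if_subset([1, 2, 1, 3], [1, 2]): A returns false, B returns true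
import Mathlib
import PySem

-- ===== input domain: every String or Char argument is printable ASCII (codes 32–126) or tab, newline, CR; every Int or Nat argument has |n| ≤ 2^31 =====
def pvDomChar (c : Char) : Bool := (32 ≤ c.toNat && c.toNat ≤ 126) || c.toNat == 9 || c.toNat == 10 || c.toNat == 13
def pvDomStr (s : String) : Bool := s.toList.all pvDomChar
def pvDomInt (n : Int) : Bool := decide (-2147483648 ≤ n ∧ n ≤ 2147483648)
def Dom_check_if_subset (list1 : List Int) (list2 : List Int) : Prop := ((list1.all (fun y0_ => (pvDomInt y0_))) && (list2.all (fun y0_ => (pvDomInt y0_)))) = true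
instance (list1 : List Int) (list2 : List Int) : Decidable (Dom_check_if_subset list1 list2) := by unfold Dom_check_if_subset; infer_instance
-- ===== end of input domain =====

-- B replaces A's nested loops with an overwritten flag by a single any() over slice
-- comparisons (idiomatic); where list2 occurs in list1 but the last first-element-aligned
-- position is not a full match, A's flag is overwritten to False while B returns the
-- intended True (stated as D_ below); list2 = [] (A raises IndexError) is excluded by Pre_.


-- ===== PORT A =====
-- inner loop: for j in range(m): if list1[i+j] != list2[j]: has_match = False; break
-- (indices are always in range under Pre_: 0 ≤ i ≤ n-m and 0 ≤ j < m, so the default 0 is never read)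
def checkInnerA (list1 list2 : List Int) (i : Int) : List Int → Bool
  | [] => true
  | j :: js =>
    if PySem.List.pyGetD list1 (i + j) 0 ≠ PySem.List.pyGetD list2 j 0 then false
    else checkInnerA list1 list2 i js

def check_if_subset (list1 : List Int) (list2 : List Int) : Bool :=
  -- n = len(list1), m = len(list2), inlined below
  (PySem.List.pyRange 0 ((list1.length : Int) - (list2.length : Int) + 1) 1).foldl
    (fun has_match i =>
      if PySem.List.pyGetD list1 i 0 = PySem.List.pyGetD list2 0 0 then
        checkInnerA list1 list2 i (PySem.List.pyRange 0 (list2.length : Int) 1)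
      else has_match)
    false

-- ===== PORT B =====
-- any(list1[i:i+m] == list2 for i in range(len(list1) - m + 1))
def check_if_subset_alt (list1 : List Int) (list2 : List Int) : Bool :=
  (PySem.List.pyRange 0 ((list1.length : Int) - (list2.length : Int) + 1) 1).any
    (fun i => decide (PySem.List.slice list1 (some i) (some (i + (list2.length : Int))) = list2))

-- ===== PRECONDITION & SPEC =====
-- Pre_ excludes only list2 = [], where A raises IndexError on list2[0].
def Pre_check_if_subset (list1 : List Int) (list2 : List Int) : Prop := list2 ≠ []
instance (list1 : List Int) (list2 : List Int) : Decidable (Pre_check_if_subset list1 list2) := by unfold Pre_check_if_subset; infer_instance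
def pvWitness_check_if_subset : List Int × List Int := ([1, 2, 3], [2, 3])

-- On inputs where list2 occurs as a contiguous sublist of list1 but the LAST position j
-- (with j ≤ n-m) having list1[j] == list2[0] is not a full match, A returns False (each
-- first-element match overwrites has_match, so only the last one counts) while B returns
-- True, the intended sublist-containment answer.
def D_check_if_subset (list1 : List Int) (list2 : List Int) : Prop :=
  list2 ≠ [] ∧
  (∃ i < list1.length - list2.length + 1, (list1.drop i).take list2.length = list2) ∧
  (∃ j < list1.length - list2.length + 1,
      list1[j]? = list2[0]? ∧
      (∀ k < list1.length - list2.length + 1, j < k → list1[k]? ≠ list2[0]?) ∧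
      (list1.drop j).take list2.length ≠ list2)
instance (list1 : List Int) (list2 : List Int) : Decidable (D_check_if_subset list1 list2) := by unfold D_check_if_subset; infer_instance

def Spec_check_if_subset (list1 : List Int) (list2 : List Int) (out : Bool) : Prop := ¬ D_check_if_subset list1 list2 → out = check_if_subset_alt list1 list2
instance (list1 : List Int) (list2 : List Int) (out : Bool) : Decidable (Spec_check_if_subset list1 list2 out) := by unfold Spec_check_if_subset; infer_instance

def pvDiffWitness_check_if_subset : List Int × List Int := ([1, 2, 1, 3], [1, 2])
def pvDiffWitnessOut_check_if_subset : Bool × Bool := (false, true)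

-- ===== CLAIM (what is proved, stated in full; the proofs are below) =====
def Claim_unchanged_check_if_subset : Prop := ∀ (list1 : List Int) (list2 : List Int), Dom_check_if_subset list1 list2 → Pre_check_if_subset list1 list2 → Spec_check_if_subset list1 list2 (check_if_subset list1 list2)
def Claim_changed_check_if_subset : Prop := Dom_check_if_subset (pvDiffWitness_check_if_subset.1) (pvDiffWitness_check_if_subset.2) ∧ Pre_check_if_subset (pvDiffWitness_check_if_subset.1) (pvDiffWitness_check_if_subset.2) ∧ D_check_if_subset (pvDiffWitness_check_if_subset.1) (pvDiffWitness_check_if_subset.2) ∧ check_if_subset (pvDiffWitness_check_if_subset.1) (pvDiffWitness_check_if_subset.2) = pvDiffWitnessOut_check_if_subset.1 ∧ check_if_subset_alt (pvDiffWitness_check_if_subset.1) (pvDiffWitness_check_if_subset.2) = pvDiffWitnessOut_check_if_subset.2 ∧ pvDiffWitnessOut_check_if_subset.1 ≠ pvDiffWitnessOut_check_if_subset.2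
def Claim_exact_check_if_subset : Prop := ∀ (list1 : List Int) (list2 : List Int), Dom_check_if_subset list1 list2 → Pre_check_if_subset list1 list2 → D_check_if_subset list1 list2 → check_if_subset list1 list2 ≠ check_if_subset_alt list1 list2

-- ===== LEMMAS AND PROOFS =====

-- A's outer loop only ever overwrites the accumulator at positions satisfying the guard,
-- so its result is decided by the LAST guard-satisfying position.
theorem foldl_overwrite (c : Int → Prop) [DecidablePred c] (g : Int → Bool) (L : List Int) (a : Bool) :
    L.foldl (fun acc i => if c i then g i else acc) a =
      (match L.reverse.find? (fun i => decide (c i)) with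
        | some i => g i
        | none => a) := by
  induction L generalizing a with
  | nil => simp
  | cons x xs ih =>
    simp only [List.foldl_cons, ih, List.reverse_cons, List.find?_append]
    cases h : xs.reverse.find? (fun i => decide (c i)) with
    | some i => simp
    | none =>
      simp only [Option.none_or]
      by_cases hc : c x <;> simp [List.find?, hc]

-- A's inner loop is an all-check over its index list.
theorem checkInnerA_eq_all (list1 list2 : List Int) (i : Int) (js : List Int) :
    checkInnerA list1 list2 i js =
      js.all (fun j => PySem.List.pyGetD list1 (i + j) 0 = PySem.List.pyGetD list2 j 0) := by
  induction js with
  | nil => rfl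
  | cons j js ih =>
    by_cases h : PySem.List.pyGetD list1 (i + j) 0 = PySem.List.pyGetD list2 j 0 <;>
      simp [checkInnerA, h, ih]

-- At an in-range position, A's elementwise full comparison equals a slice comparison.
theorem inner_eq_slice (list1 list2 : List Int) (i : Int)
    (h0 : 0 ≤ i) (h1 : i + (list2.length : Int) ≤ (list1.length : Int)) :
    checkInnerA list1 list2 i (PySem.List.pyRange 0 (list2.length : Int) 1) =
      decide (PySem.List.slice list1 (some i) (some (i + (list2.length : Int))) = list2) := by
  rw [checkInnerA_eq_all]
  rw [PySem.List.slice_toNat list1 h0 (by omega)]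
  have htoNat : (i + (list2.length : Int)).toNat - i.toNat = list2.length := by omega
  rw [htoNat]
  have hlen : (List.take list2.length (List.drop i.toNat list1)).length = list2.length := by
    rw [List.length_take, List.length_drop]; omega
  rw [PySem.List.pyRange_zero_nat, List.all_map, Bool.eq_iff_iff]
  simp only [List.all_eq_true, decide_eq_true_eq]
  constructor
  · intro hall
    apply List.ext_getElem hlen
    intro j hj1 hj2
    have hj : j < list2.length := hj2
    have hx := hall j (List.mem_range.mpr hj)
    simp only [Function.comp_apply, decide_eq_true_eq] at hx
    rw [PySem.List.pyGetD_eq_getElem list1 0 (by omega) (by omega),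
        PySem.List.pyGetD_eq_getElem list2 0 (by omega) (by omega)] at hx
    have h1nat : (i + (j : Int)).toNat = i.toNat + j := by omega
    have h2nat : ((j : Int)).toNat = j := by omega
    simp only [h1nat, h2nat] at hx
    rw [List.getElem_take, List.getElem_drop]
    exact hx
  · intro heq j hj
    have hjm : j < list2.length := List.mem_range.mp hj
    simp only [Function.comp_apply, decide_eq_true_eq]
    rw [PySem.List.pyGetD_eq_getElem list1 0 (by omega) (by omega),
        PySem.List.pyGetD_eq_getElem list2 0 (by omega) (by omega)]
    have h1nat : (i + (j : Int)).toNat = i.toNat + j := by omega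
    have h2nat : ((j : Int)).toNat = j := by omega
    simp only [h1nat, h2nat]
    have hg : (List.take list2.length (List.drop i.toNat list1))[j]'(by omega) = list2[j]'hjm := by
      simp only [heq]
    rwa [List.getElem_take, List.getElem_drop] at hg

-- find? on the reverse of a strictly increasing list returns the LARGEST satisfying element.
theorem find?_rev_some_max (L : List Int) (hL : L.Pairwise (· < ·)) (p : Int → Bool) (x : Int)
    (h : L.reverse.find? p = some x) :
    x ∈ L ∧ p x = true ∧ ∀ y ∈ L, x < y → p y = false := by
  induction L with
  | nil => simp at h
  | cons a t ih =>
    rw [List.reverse_cons, List.find?_append] at h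
    rcases List.pairwise_cons.mp hL with ⟨ha, ht⟩
    cases hf : t.reverse.find? p with
    | some y =>
      rw [hf] at h; simp only [Option.some_or] at h
      obtain rfl : y = x := by injection h
      obtain ⟨hmem, hp, hmax⟩ := ih ht hf
      refine ⟨List.mem_cons_of_mem _ hmem, hp, ?_⟩
      intro z hz hlt
      rcases List.mem_cons.mp hz with rfl | hz'
      · exact absurd (ha _ hmem) (by omega)
      · exact hmax z hz' hlt
    | none =>
      rw [hf] at h; simp only [Option.none_or] at h
      have hnone := List.find?_eq_none.mp hf
      by_cases hp : p a = true
      · simp only [List.find?_cons, hp] at h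
        obtain rfl : a = x := by injection h
        refine ⟨List.mem_cons_self, hp, ?_⟩
        intro z hz hlt
        rcases List.mem_cons.mp hz with rfl | hz'
        · omega
        · have := hnone z (List.mem_reverse.mpr hz')
          simpa using this
      · simp only [List.find?_cons] at h
        rw [Bool.not_eq_true] at hp
        simp [hp] at h

-- Conversely: the largest satisfying element of a strictly increasing list IS what
-- find? on the reverse returns.
theorem find?_rev_of_max (L : List Int) (hL : L.Pairwise (· < ·)) (p : Int → Bool) (x : Int)
    (hmem : x ∈ L) (hp : p x = true) (hmax : ∀ y ∈ L, x < y → p y = false) :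
    L.reverse.find? p = some x := by
  induction L with
  | nil => simp at hmem
  | cons a t ih =>
    rw [List.reverse_cons, List.find?_append]
    rcases List.pairwise_cons.mp hL with ⟨ha, ht⟩
    rcases List.mem_cons.mp hmem with rfl | hx
    · have hnone : t.reverse.find? p = none := by
        apply List.find?_eq_none.mpr
        intro z hz
        have hz' := List.mem_reverse.mp hz
        simp [hmax z (List.mem_cons_of_mem _ hz') (ha z hz')]
      rw [hnone]
      simp [hp]
    · have := ih ht hx (fun y hy hlt => hmax y (List.mem_cons_of_mem _ hy) hlt)
      rw [this]; rfl

-- A full match at i forces i + m ≤ n (for nonempty list2).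
theorem match_bound (list1 list2 : List Int) (h2 : list2 ≠ []) (i : Nat)
    (h : (list1.drop i).take list2.length = list2) : i + list2.length ≤ list1.length := by
  have hlen := congrArg List.length h
  have hne : 0 < list2.length := List.length_pos_iff.mpr h2
  simp only [List.length_take, List.length_drop] at hlen
  omega

-- B's any() is an existence statement over Nat positions.
theorem alt_iff (list1 list2 : List Int) (h2 : list2 ≠ []) :
    check_if_subset_alt list1 list2 = true ↔
      ∃ i < list1.length - list2.length + 1, (list1.drop i).take list2.length = list2 := by
  unfold check_if_subset_alt
  rw [List.any_eq_true]
  constructor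
  · rintro ⟨i, hmem, hp⟩
    rw [PySem.List.mem_pyRange_one] at hmem
    rw [decide_eq_true_eq] at hp
    rw [PySem.List.slice_toNat list1 hmem.1 (by omega)] at hp
    have htoNat : (i + (list2.length : Int)).toNat - i.toNat = list2.length := by omega
    rw [htoNat] at hp
    have hb := match_bound list1 list2 h2 i.toNat hp
    exact ⟨i.toNat, by omega, hp⟩
  · rintro ⟨i, hi, hp⟩
    have hb := match_bound list1 list2 h2 i hp
    refine ⟨(i : Int), ?_, ?_⟩
    · rw [PySem.List.mem_pyRange_one]; constructor <;> [positivity; omega]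
    · rw [decide_eq_true_eq]
      rw [PySem.List.slice_toNat list1 (by positivity) (by positivity)]
      have h1 : ((i : Int)).toNat = i := by omega
      have h2' : (((i : Int)) + (list2.length : Int)).toNat - ((i : Int)).toNat = list2.length := by omega
      rw [h1] at h2' ⊢
      rw [h2']
      exact hp

-- The guard A tests, in Nat terms (indices in range).
theorem guard_iff (list1 list2 : List Int) (h2 : list2 ≠ []) (k : Nat) (hk : k < list1.length) :
    (PySem.List.pyGetD list1 (k : Int) 0 = PySem.List.pyGetD list2 0 0) ↔ list1[k]? = list2[0]? := by
  have h0 : 0 < list2.length := List.length_pos_iff.mpr h2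
  rw [PySem.List.pyGetD_eq_getElem list1 0 (by omega) (by omega),
      PySem.List.pyGetD_eq_getElem list2 0 (by omega) (by omega)]
  simp only [Int.toNat_natCast, Int.toNat_zero]
  rw [List.getElem?_eq_getElem hk, List.getElem?_eq_getElem h0]
  exact ⟨fun h => by rw [h], fun h => by injection h⟩

-- A as "the last guard-satisfying position decides".
theorem A_char (list1 list2 : List Int) :
    check_if_subset list1 list2 =
      (match ((PySem.List.pyRange 0 ((list1.length : Int) - (list2.length : Int) + 1) 1).reverse.find?
          (fun i => decide (PySem.List.pyGetD list1 i 0 = PySem.List.pyGetD list2 0 0))) with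
        | some i => checkInnerA list1 list2 i (PySem.List.pyRange 0 (list2.length : Int) 1)
        | none => false) := by
  unfold check_if_subset
  exact foldl_overwrite (fun i => PySem.List.pyGetD list1 i 0 = PySem.List.pyGetD list2 0 0)
    (fun i => checkInnerA list1 list2 i (PySem.List.pyRange 0 (list2.length : Int) 1)) _ false


-- A full match at i fixes the head: list1[i] = list2[0].
theorem match_head (list1 list2 : List Int) (h2 : list2 ≠ []) (i : Nat)
    (h : (list1.drop i).take list2.length = list2) : list1[i]? = list2[0]? := by
  have h0 : 0 < list2.length := List.length_pos_iff.mpr h2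
  have := congrArg (fun l => l[0]?) h
  simpa [List.getElem?_take, List.getElem?_drop, h0] using this

-- ===== VERDICT (by name: the statements are the Claim_ definitions above) =====
theorem check_if_subset_spec : Claim_unchanged_check_if_subset := by
  intro list1 list2 _ hpre hD
  have h0 : 0 < list2.length := List.length_pos_iff.mpr hpre
  cases hf : ((PySem.List.pyRange 0 ((list1.length : Int) - (list2.length : Int) + 1) 1).reverse.find?
      (fun i => decide (PySem.List.pyGetD list1 i 0 = PySem.List.pyGetD list2 0 0))) with
  | none =>
    rw [A_char, hf]
    show false = check_if_subset_alt list1 list2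
    cases halt : check_if_subset_alt list1 list2 with
    | false => rfl
    | true =>
      exfalso
      obtain ⟨i, hi, hm⟩ := (alt_iff list1 list2 hpre).mp halt
      have hb := match_bound list1 list2 hpre i hm
      have hmem : (i : Int) ∈ PySem.List.pyRange 0 ((list1.length : Int) - (list2.length : Int) + 1) 1 := by
        rw [PySem.List.mem_pyRange_one]; omega
      have := List.find?_eq_none.mp hf (i : Int) (List.mem_reverse.mpr hmem)
      rw [Bool.not_eq_true, decide_eq_false_iff_not] at this
      exact this ((guard_iff list1 list2 hpre i (by omega)).mpr (match_head list1 list2 hpre i hm))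
  | some j =>
    rw [A_char, hf]
    obtain ⟨hmem, hp, hmax⟩ := find?_rev_some_max _ (PySem.List.pairwise_lt_pyRange_one 0 _) _ j hf
    rw [PySem.List.mem_pyRange_one] at hmem
    obtain ⟨hj0, hjlt⟩ := hmem
    show checkInnerA list1 list2 j (PySem.List.pyRange 0 (list2.length : Int) 1) = check_if_subset_alt list1 list2
    rw [inner_eq_slice list1 list2 j hj0 (by omega)]
    rw [PySem.List.slice_toNat list1 hj0 (by omega)]
    have htoNat : (j + (list2.length : Int)).toNat - j.toNat = list2.length := by omega
    rw [htoNat]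
    by_cases hm : (list1.drop j.toNat).take list2.length = list2
    · rw [decide_eq_true hm]
      exact ((alt_iff list1 list2 hpre).mpr ⟨j.toNat, by omega, hm⟩).symm
    · rw [decide_eq_false hm]
      cases halt : check_if_subset_alt list1 list2 with
      | false => rfl
      | true =>
        exfalso
        obtain ⟨i, hi, hmi⟩ := (alt_iff list1 list2 hpre).mp halt
        apply hD
        refine ⟨hpre, ⟨i, hi, hmi⟩, j.toNat, by omega, ?_, ?_, hm⟩
        · rw [decide_eq_true_eq] at hp
          have : ((j.toNat : Int)) = j := by omega
          exact (guard_iff list1 list2 hpre j.toNat (by omega)).mp (by rw [this]; exact hp)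
        · intro k hk hjk
          have hb := match_bound list1 list2 hpre i hmi
          have hmemk : (k : Int) ∈ PySem.List.pyRange 0 ((list1.length : Int) - (list2.length : Int) + 1) 1 := by
            rw [PySem.List.mem_pyRange_one]; omega
          have := hmax (k : Int) hmemk (by omega)
          rw [decide_eq_false_iff_not] at this
          intro hcon
          exact this ((guard_iff list1 list2 hpre k (by omega)).mpr hcon)

theorem check_if_subset_changed : Claim_changed_check_if_subset := by
  unfold Claim_changed_check_if_subset; decide

theorem check_if_subset_tight : Claim_exact_check_if_subset := by
  intro list1 list2 _ hpre hD
  obtain ⟨h2, ⟨i, hi, hmi⟩, j, hj, hjhead, hjmax, hjno⟩ := hD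
  have h0 : 0 < list2.length := List.length_pos_iff.mpr h2
  have hb := match_bound list1 list2 h2 i hmi
  have halt : check_if_subset_alt list1 list2 = true :=
    (alt_iff list1 list2 h2).mpr ⟨i, hi, hmi⟩
  have hA : check_if_subset list1 list2 = false := by
    rw [A_char]
    have hfind : ((PySem.List.pyRange 0 ((list1.length : Int) - (list2.length : Int) + 1) 1).reverse.find?
        (fun x => decide (PySem.List.pyGetD list1 x 0 = PySem.List.pyGetD list2 0 0))) = some (j : Int) := by
      apply find?_rev_of_max _ (PySem.List.pairwise_lt_pyRange_one 0 _)
      · rw [PySem.List.mem_pyRange_one]; omega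
      · exact decide_eq_true ((guard_iff list1 list2 h2 j (by omega)).mpr hjhead)
      · intro y hy hlt
        rw [PySem.List.mem_pyRange_one] at hy
        rw [decide_eq_false_iff_not]
        intro hcon
        have hyn : y = ((y.toNat : Nat) : Int) := by omega
        rw [hyn] at hcon
        exact hjmax y.toNat (by omega) (by omega)
          ((guard_iff list1 list2 h2 y.toNat (by omega)).mp hcon)
    rw [hfind]
    show checkInnerA list1 list2 (j : Int) (PySem.List.pyRange 0 (list2.length : Int) 1) = false
    rw [inner_eq_slice list1 list2 (j : Int) (by omega) (by omega)]
    rw [PySem.List.slice_toNat list1 (by omega) (by omega)]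
    have h1 : ((j : Int)).toNat = j := by omega
    have h2'' : (((j : Int)) + (list2.length : Int)).toNat - ((j : Int)).toNat = list2.length := by omega
    rw [h1] at h2'' ⊢
    rw [h2'']
    exact decide_eq_false hjno
  rw [hA, halt]
  exact Bool.false_ne_true
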